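-- pv_equiv track=rewrite | github.com/Amirux-dev/PPMS-Analysis-Tool | app_mr_analysis.py | choose_field_column
-- ===== SOURCE A (Python) =====
-- from typing import List, Dict, Any, Optional, Tuple
--
-- def choose_field_column(cols: List[str]) -> int:
--     preferred = ["Magnetic Field (T)", "Magnetic Field (Oe)", "Field (T)", "Field (Oe)"]
--     for p in preferred:
--         if p in cols:
--             return cols.index(p)
--
--     hits = [(i, c) for i, c in enumerate(cols) if "field" in c.lower()]
--     if hits:
--         def score(item: Tuple[int, str]) -> Tuple[int, int, int]:
--             _, c = item
--             lc = c.lower()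
--             return (0 if "(t" in lc else 1, 0 if "(oe" in lc else 1, len(lc))
--         hits.sort(key=score)
--         return hits[0][0]
--     return -1
-- ===== SOURCE B (Python) =====
-- def choose_field_column(cols):
--     preferred = ["Magnetic Field (T)", "Magnetic Field (Oe)", "Field (T)", "Field (Oe)"]
--     first_idx = {}
--     best_i = -1
--     best_score = None
--     for i, c in enumerate(cols):
--         if c not in first_idx:
--             first_idx[c] = i
--         lc = c.lower()
--         if "field" in lc:
--             s = (0 if "(t" in lc else 1, 0 if "(oe" in lc else 1, len(lc))
--             if best_score is None or s < best_score:
--                 best_i, best_score = i, s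
--     for p in preferred:
--         if p in first_idx:
--             return first_idx[p]
--     return best_i
-- ===== Notes on version B (the rewrite author's own statement) =====
-- stated objective: alternative
-- what changed: Replaces A's four membership scans plus list.index, the filter pass and the full stable sort of hits by a single pass over the columns that records each string's first index in a dict and keeps the best-scoring 'field' hit so far (first minimum, matching the stable sort's head).
import Mathlib
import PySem

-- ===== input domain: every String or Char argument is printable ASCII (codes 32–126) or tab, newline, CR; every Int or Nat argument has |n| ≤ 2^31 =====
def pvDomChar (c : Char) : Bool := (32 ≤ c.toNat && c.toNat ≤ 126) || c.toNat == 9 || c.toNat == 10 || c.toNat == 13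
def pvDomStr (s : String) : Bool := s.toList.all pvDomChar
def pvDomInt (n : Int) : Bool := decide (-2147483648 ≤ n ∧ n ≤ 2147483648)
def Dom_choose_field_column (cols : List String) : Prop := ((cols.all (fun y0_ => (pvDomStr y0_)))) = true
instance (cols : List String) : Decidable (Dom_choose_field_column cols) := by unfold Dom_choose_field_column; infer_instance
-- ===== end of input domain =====

-- B replaces A's repeated membership scans + filter + full sort by ONE pass over the columns
-- (a first-occurrence dict plus a running best-scoring hit); objective: alternative single-pass algorithm.

abbrev pvK : Type := Lex (Nat × Lex (Nat × Int))

def pvPreferred : List String :=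
  ["Magnetic Field (T)", "Magnetic Field (Oe)", "Field (T)", "Field (Oe)"]

-- ===== PORT A =====
def pvScoreA (item : Int × String) : pvK :=
  let lc := PySem.Str.lower item.2
  toLex ((if PySem.Str.isIn "(t" lc then 0 else 1),
    toLex ((if PySem.Str.isIn "(oe" lc then 0 else 1), PySem.Str.len lc))

def pvAHits (cols : List String) : Int :=
  let hits := (PySem.List.enumerate cols).filter
    (fun ic => PySem.Str.isIn "field" (PySem.Str.lower ic.2))
  if hits.isEmpty then -1
  else
    match PySem.List.sorted hits pvScoreA with
    | m :: _ => m.1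
    | [] => -1

def pvALoop : List String → List String → Int
  | [], cols => pvAHits cols
  | p :: ps, cols =>
    if p ∈ cols then
      match PySem.List.index? cols p with
      | some k => (k : Int)
      | none => 0   -- unreachable: guarded by p ∈ cols (Python would raise only when absent)
    else pvALoop ps cols

def choose_field_column (cols : List String) : Int :=
  pvALoop pvPreferred cols

-- ===== PORT B =====
def pvScoreB (lc : String) : pvK :=
  toLex ((if PySem.Str.isIn "(t" lc then 0 else 1),
    toLex ((if PySem.Str.isIn "(oe" lc then 0 else 1), PySem.Str.len lc))

-- 'if c not in first_idx: first_idx[c] = i'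
def pvDStep (d : PySem.Dict String Int) (ic : Int × String) : PySem.Dict String Int :=
  if (d.get? ic.2).isSome then d else d.insert ic.2 ic.1

-- the running (best_i, best_score) update
def pvBBStep (bb : Int × Option pvK) (ic : Int × String) : Int × Option pvK :=
  let lc := PySem.Str.lower ic.2
  if PySem.Str.isIn "field" lc then
    let s := pvScoreB lc
    match bb.2 with
    | none => (ic.1, some s)
    | some b => if s < b then (ic.1, some s) else (bb.1, some b)
  else bb

def pvBStep (st : PySem.Dict String Int × Int × Option pvK) (ic : Int × String) :
    PySem.Dict String Int × Int × Option pvK :=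
  (pvDStep st.1 ic, pvBBStep st.2 ic)

def pvBRet : List String → PySem.Dict String Int → Int → Int
  | [], _, bi => bi
  | p :: ps, d, bi =>
    match d.get? p with
    | some k => k
    | none => pvBRet ps d bi

def choose_field_column_alt (cols : List String) : Int :=
  let st := (PySem.List.enumerate cols).foldl pvBStep (PySem.Dict.empty, -1, none)
  pvBRet pvPreferred st.1 st.2.1

-- ===== PRECONDITION & SPEC =====
def Spec_choose_field_column (cols : List String) (out : Int) : Prop := out = choose_field_column_alt cols
instance (cols : List String) (out : Int) : Decidable (Spec_choose_field_column cols out) := by unfold Spec_choose_field_column; infer_instance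

-- ===== CLAIM (what is proved, stated in full; the proofs are below) =====
def Claim_equal_choose_field_column : Prop := ∀ (cols : List String), Dom_choose_field_column cols → Spec_choose_field_column cols (choose_field_column cols)

-- ===== LEMMAS AND PROOFS =====

lemma pvScoreBA (x : Int × String) : pvScoreB (PySem.Str.lower x.2) = pvScoreA x := rfl

-- the combined fold is the pair of the two independent folds
lemma pvFoldSplit (xs : List (Int × String)) (d : PySem.Dict String Int) (bb : Int × Option pvK) :
    xs.foldl pvBStep (d, bb) = (xs.foldl pvDStep d, xs.foldl pvBBStep bb) := by
  induction xs generalizing d bb with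
  | nil => rfl
  | cons x xs ih => simpa [pvBStep] using ih (pvDStep d x) (pvBBStep bb x)

-- the dict fold records the FIRST index of every string
lemma pvDictGet (cols : List String) : ∀ (s : Int) (d : PySem.Dict String Int) (p : String),
    ((PySem.List.enumerate cols s).foldl pvDStep d).get? p =
      match d.get? p with
      | some v => some v
      | none => (PySem.List.index? cols p).map (fun k => s + (k : Int)) := by
  induction cols with
  | nil => intro s d p; cases hd : d.get? p <;> simp [PySem.List.enumerate, PySem.List.index?, hd]
  | cons c cols ih =>
    intro s d p
    rw [PySem.List.enumerate_cons, List.foldl_cons, ih (s + 1)]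
    by_cases hpc : p = c
    · subst hpc
      cases hd : d.get? p with
      | some v => simp [pvDStep, hd]
      | none =>
        simp only [pvDStep, hd, Option.isSome_none, Bool.false_eq_true, if_false,
          PySem.Dict.get?_insert_self, PySem.List.index?_cons_self]
        simp
    · have hne : c ≠ p := fun h => hpc h.symm
      have hstep : (pvDStep d (s, c)).get? p = d.get? p := by
        unfold pvDStep
        cases hd : d.get? c with
        | some v => simp
        | none => simp [PySem.Dict.get?_insert_of_ne d s hpc]
      rw [hstep]
      cases hd : d.get? p with
      | some v => simp
      | none =>
        rw [PySem.List.index?_cons_of_ne cols hne]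
        cases hidx : PySem.List.index? cols p <;> simp
        omega

-- elements failing the 'field' test leave the running best untouched
lemma pvBBFilter (xs : List (Int × String)) (bb : Int × Option pvK) :
    xs.foldl pvBBStep bb =
      (xs.filter (fun ic => PySem.Str.isIn "field" (PySem.Str.lower ic.2))).foldl pvBBStep bb := by
  induction xs generalizing bb with
  | nil => rfl
  | cons x xs ih =>
    rw [List.foldl_cons, List.filter_cons]
    by_cases h : PySem.Str.isIn "field" (PySem.Str.lower x.2) = true
    · rw [if_pos h, List.foldl_cons, ih]
    · have hbb : pvBBStep bb x = bb := by
        simp only [pvBBStep]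
        rw [if_neg h]
      rw [if_neg h, hbb, ih]

-- head abstraction of the insertion-sort accumulator
def pvHm (acc : List (Int × String)) (bi : Int) : Int × Option pvK :=
  match acc with
  | [] => (bi, none)
  | m :: _ => (m.1, some (pvScoreA m))

lemma pvStepHm (x : Int × String) (hx : PySem.Str.isIn "field" (PySem.Str.lower x.2) = true)
    (acc : List (Int × String)) (bi : Int) :
    pvBBStep (pvHm acc bi) x =
      pvHm (PySem.List.insertBy (fun a b => decide (pvScoreA a < pvScoreA b)) x acc) bi := by
  cases acc with
  | nil =>
    simp only [pvBBStep, pvHm, PySem.List.insertBy]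
    rw [if_pos hx, pvScoreBA]
  | cons m t =>
    simp only [pvBBStep, pvHm, PySem.List.insertBy]
    rw [if_pos hx, pvScoreBA]
    by_cases hlt : pvScoreA x < pvScoreA m
    · rw [if_pos hlt, if_pos (decide_eq_true hlt)]
    · rw [if_neg hlt, if_neg (by simpa using hlt)]

lemma pvFoldHm (hits : List (Int × String))
    (hall : ∀ x ∈ hits, PySem.Str.isIn "field" (PySem.Str.lower x.2) = true) :
    ∀ (acc : List (Int × String)) (bi : Int),
    hits.foldl pvBBStep (pvHm acc bi) =
      pvHm (hits.foldl (fun a x => PySem.List.insertBy (fun a b => decide (pvScoreA a < pvScoreA b)) x a) acc) bi := by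
  induction hits with
  | nil => intro acc bi; rfl
  | cons x xs ih =>
    intro acc bi
    rw [List.foldl_cons, pvStepHm x (hall x (by simp)) acc bi,
      ih (fun y hy => hall y (by simp [hy])), List.foldl_cons]

-- the B fold's best component equals A's hits branch
lemma pvBestEq (cols : List String) :
    (((PySem.List.enumerate cols).foldl pvBBStep ((-1 : Int), (none : Option pvK)))).1 = pvAHits cols := by
  rw [pvBBFilter]
  set hits := (PySem.List.enumerate cols).filter
    (fun ic => PySem.Str.isIn "field" (PySem.Str.lower ic.2)) with hhits
  have hall : ∀ x ∈ hits, PySem.Str.isIn "field" (PySem.Str.lower x.2) = true := by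
    intro x hx
    exact (List.mem_filter.mp hx).2
  have h0 : ((-1 : Int), (none : Option pvK)) = pvHm [] (-1) := rfl
  rw [h0, pvFoldHm hits hall [] (-1), ← PySem.List.sorted_eq_foldl_insertBy hits pvScoreA]
  have hA : pvAHits cols =
      if hits.isEmpty then -1
      else
        match PySem.List.sorted hits pvScoreA with
        | m :: _ => m.1
        | [] => -1 := rfl
  rw [hA]
  cases hs : PySem.List.sorted hits pvScoreA with
  | nil =>
    have hnil : hits = [] := (PySem.List.sorted_eq_nil_iff hits pvScoreA false).mp hs
    simp [pvHm, hnil]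
  | cons m t =>
    have hne : hits ≠ [] := by
      intro h
      rw [h] at hs
      simp [(PySem.List.sorted_eq_nil_iff ([] : List (Int × String)) pvScoreA false).mpr rfl] at hs
    simp only [pvHm]
    rw [if_neg (by simpa [List.isEmpty_iff] using hne)]

-- the preferred-name scan agrees between the two programs
lemma pvLoopEq (ps : List String) (cols : List String) :
    pvALoop ps cols =
      pvBRet ps ((PySem.List.enumerate cols).foldl pvDStep PySem.Dict.empty)
        (((PySem.List.enumerate cols).foldl pvBBStep ((-1 : Int), (none : Option pvK)))).1 := by
  induction ps with
  | nil => simpa [pvALoop, pvBRet] using (pvBestEq cols).symm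
  | cons p ps ih =>
    have hget := pvDictGet cols 0 PySem.Dict.empty p
    have hempty : (PySem.Dict.empty : PySem.Dict String Int).get? p = none := rfl
    rw [hempty] at hget
    cases hidx : PySem.List.index? cols p with
    | none =>
      have hmem : p ∉ cols := (PySem.List.index?_eq_none_iff cols p).mp hidx
      rw [hidx] at hget
      simp at hget
      simp only [pvALoop, pvBRet]
      rw [if_neg hmem, hget, ih]
    | some k =>
      have hmem : p ∈ cols := by
        rw [← PySem.List.index?_isSome_iff cols p, hidx]; rfl
      rw [hidx] at hget
      simp at hget
      simp only [pvALoop, pvBRet]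
      rw [if_pos hmem, hidx, hget]

-- ===== VERDICT (by name: the statement is the Claim_ definition above) =====
theorem choose_field_column_spec : Claim_equal_choose_field_column := by
  intro cols _
  unfold Spec_choose_field_column choose_field_column choose_field_column_alt
  rw [pvFoldSplit]
  exact pvLoopEq pvPreferred cols
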